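-- pv_equiv track=rewrite | github.com/hsugvusrihgvir/hotel_app | app/ui/data_window.py | _build_grouping_sets_sql
-- ===== SOURCE A (Python) =====
-- def _build_grouping_sets_sql(cols: list[str]) -> str:
--     """Собрать выражение для GROUPING SETS по выбранным колонкам.
--
--     Строим все непустые комбинации колонок + пустое множество для
--     общего итога. Для 3 колонок получится, например:
--     GROUPING SETS ((a), (b), (c), (a, b), (a, c), (b, c), (a, b, c), ()).
--     """
--     if not cols:
--         return ""
--
--     n = len(cols)
--     sets: list[str] = []
--
--     # все непустые подмножества
--     for mask in range(1, 1 << n):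
--         subset = [cols[i] for i in range(n) if mask & (1 << i)]
--         if subset:
--             sets.append("(" + ", ".join(subset) + ")")
--
--     # общий итог
--     sets.append("()")
--
--     return ", ".join(sets)
-- ===== SOURCE B (Python) =====
-- def _build_grouping_sets_sql(cols: list[str]) -> str:
--     """Same GROUPING SETS expression, built by iterative power-set doubling."""
--     if not cols:
--         return ""
--
--     # subsets[m] holds exactly the columns whose bit is set in m, in column order
--     subsets: list[list[str]] = [[]]
--     for c in cols:
--         subsets += [s + [c] for s in subsets]
--
--     parts = ["(" + ", ".join(s) + ")" for s in subsets[1:]] + ["()"]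
--     return ", ".join(parts)
-- ===== Notes on version B (the rewrite author's own statement) =====
-- stated objective: alternative
-- what changed: Replaces the bitmask enumeration (outer loop over masks 1..2^n-1 with an inner index/filter scan rebuilding each subset from bits) by iterative power-set doubling: a maintained list of subsets is extended once per column with copies carrying that column, which yields the subsets in the same binary-mask order.
import Mathlib
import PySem

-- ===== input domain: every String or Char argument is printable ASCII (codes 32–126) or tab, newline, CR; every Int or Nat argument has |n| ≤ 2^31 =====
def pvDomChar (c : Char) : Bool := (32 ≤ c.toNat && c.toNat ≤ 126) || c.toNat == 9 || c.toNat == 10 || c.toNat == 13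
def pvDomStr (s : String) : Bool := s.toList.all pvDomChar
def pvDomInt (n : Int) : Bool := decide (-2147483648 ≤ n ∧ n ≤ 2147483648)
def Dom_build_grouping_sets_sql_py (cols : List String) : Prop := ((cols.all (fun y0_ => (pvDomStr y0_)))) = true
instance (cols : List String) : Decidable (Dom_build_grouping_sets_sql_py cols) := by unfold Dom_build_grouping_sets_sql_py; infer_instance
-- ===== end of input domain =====

-- B builds the power set by iterative doubling (one growing list of subsets, extended per
-- column) instead of A's bitmask enumeration with a per-mask bit scan; same output.

-- ===== PORT A =====
-- range(1, 1 << n) over nonnegative ints is ported as (List.range (2^n)).drop 1;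
-- cols[i] with 0 ≤ i < len(cols) is ported as cols.getD i "" (always in range, exact);
-- mask & (1 << i) is the Nat bitwise &&& / <<< (exact: both operands nonnegative).
def build_grouping_sets_sql_py (cols : List String) : String :=
  if cols = [] then ""
  else
    let n := cols.length
    let sets : List String :=
      ((List.range (2 ^ n)).drop 1).foldl (fun sets mask =>
        let subset := ((List.range n).filter (fun i => mask &&& (1 <<< i) ≠ 0)).map
          (fun i => cols.getD i "")
        if subset ≠ [] then sets ++ ["(" ++ PySem.Str.join ", " subset ++ ")"] else sets) []
    PySem.Str.join ", " (sets ++ ["()"])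

-- ===== PORT B =====
def build_grouping_sets_sql_py_alt (cols : List String) : String :=
  if cols = [] then ""
  else
    let subsets : List (List String) :=
      cols.foldl (fun acc c => acc ++ acc.map (fun s => s ++ [c])) [[]]
    PySem.Str.join ", "
      ((subsets.drop 1).map (fun s => "(" ++ PySem.Str.join ", " s ++ ")") ++ ["()"])

-- ===== PRECONDITION & SPEC =====
def Spec_build_grouping_sets_sql_py (cols : List String) (out : String) : Prop := out = build_grouping_sets_sql_py_alt cols
instance (cols : List String) (out : String) : Decidable (Spec_build_grouping_sets_sql_py cols out) := by unfold Spec_build_grouping_sets_sql_py; infer_instance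

-- ===== CLAIM (what is proved, stated in full; the proofs are below) =====
def Claim_equal_build_grouping_sets_sql_py : Prop := ∀ (cols : List String), Dom_build_grouping_sets_sql_py cols → Spec_build_grouping_sets_sql_py cols (build_grouping_sets_sql_py cols)

-- ===== LEMMAS AND PROOFS =====

-- the subset A's inner comprehension builds for a given mask
def pvSubsetOf (cols : List String) (mask : Nat) : List String :=
  ((List.range cols.length).filter (fun i => mask &&& (1 <<< i) ≠ 0)).map
    (fun i => cols.getD i "")

theorem pvAnd_ne_iff (m i : Nat) : (m &&& (1 <<< i) ≠ 0) ↔ m / 2 ^ i % 2 = 1 := by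
  rw [Nat.one_shiftLeft, Nat.and_two_pow]
  rcases h : Nat.testBit m i with _ | _ <;>
    simp_all [Nat.testBit_eq_decide_div_mod_eq, Nat.pow_eq_zero]

-- low bits of 2^n + m agree with those of m; bit n is set (for m < 2^n)
theorem pvBit_low (n m i : Nat) (hi : i < n) :
    ((2 ^ n + m) / 2 ^ i % 2 = 1) ↔ (m / 2 ^ i % 2 = 1) := by
  have h : 2 ^ n = 2 ^ (n - i) * 2 ^ i := by
    rw [← pow_add]; congr 1; omega
  rw [h, Nat.add_comm, Nat.add_mul_div_right _ _ (Nat.two_pow_pos i)]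
  have heven : 2 ^ (n - i) % 2 = 0 := by
    have : n - i ≠ 0 := by omega
    rcases Nat.exists_eq_succ_of_ne_zero this with ⟨k, hk⟩
    simp [hk, pow_succ, Nat.mul_mod_left]
  omega

theorem pvBit_high (n m : Nat) (hm : m < 2 ^ n) : (2 ^ n + m) / 2 ^ n % 2 = 1 := by
  rw [Nat.add_comm, Nat.add_div_right _ (Nat.two_pow_pos n),
    Nat.div_eq_of_lt hm]

theorem pvBit_top (n m : Nat) (hm : m < 2 ^ n) : ¬ (m / 2 ^ n % 2 = 1) := by
  rw [Nat.div_eq_of_lt hm]; omega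

theorem pvSubsetOf_append_low (cols : List String) (c : String) (m : Nat)
    (hm : m < 2 ^ cols.length) : pvSubsetOf (cols ++ [c]) m = pvSubsetOf cols m := by
  unfold pvSubsetOf
  rw [List.length_append, List.length_singleton, List.range_add, List.filter_append]
  have h1 : (List.map (fun x => cols.length + x) (List.range 1)).filter
      (fun i => decide (m &&& (1 <<< i) ≠ 0)) = [] := by
    simp only [List.range_one, List.map, Nat.add_zero, List.filter]
    have := pvBit_top cols.length m hm
    rw [← pvAnd_ne_iff] at this
    simp [this]
  rw [h1, List.append_nil]
  refine List.map_congr_left ?_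
  intro i hi
  have hilt : i < cols.length := (List.mem_filter.mp hi).1 |> List.mem_range.mp
  exact List.getD_append _ _ _ _ hilt

theorem pvSubsetOf_append_high (cols : List String) (c : String) (m : Nat)
    (hm : m < 2 ^ cols.length) :
    pvSubsetOf (cols ++ [c]) (2 ^ cols.length + m) = pvSubsetOf cols m ++ [c] := by
  unfold pvSubsetOf
  rw [List.length_append, List.length_singleton, List.range_add, List.filter_append,
    List.map_append]
  congr 1
  · have hfeq : (List.range cols.length).filter
        (fun i => decide ((2 ^ cols.length + m) &&& (1 <<< i) ≠ 0)) =
        (List.range cols.length).filter (fun i => decide (m &&& (1 <<< i) ≠ 0)) := by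
      refine List.filter_congr ?_
      intro i hi
      have hilt := List.mem_range.mp hi
      simp only [decide_eq_decide, pvAnd_ne_iff]
      exact pvBit_low cols.length m i hilt
    rw [hfeq]
    refine List.map_congr_left ?_
    intro i hi
    have hilt : i < cols.length := (List.mem_filter.mp hi).1 |> List.mem_range.mp
    exact List.getD_append _ _ _ _ hilt
  · have hbit : (2 ^ cols.length + m) &&& (1 <<< cols.length) ≠ 0 := by
      rw [pvAnd_ne_iff]; exact pvBit_high cols.length m hm
    simp [List.range_one, List.filter, hbit]

-- the doubling fold produces exactly the subsets of all masks 0 .. 2^n - 1 in mask order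
theorem pvDoubling_eq (cols : List String) :
    cols.foldl (fun acc c => acc ++ acc.map (fun s => s ++ [c])) [[]] =
      (List.range (2 ^ cols.length)).map (pvSubsetOf cols) := by
  induction cols using List.reverseRecOn with
  | nil => simp [pvSubsetOf]
  | append_singleton cols c ih =>
    rw [List.foldl_append, ih]
    simp only [List.foldl_cons, List.foldl_nil]
    rw [List.length_append, List.length_singleton, pow_succ, Nat.mul_two, List.range_add,
      List.map_append, List.map_map, List.map_map]
    congr 1
    · refine List.map_congr_left ?_
      intro m hm
      exact (pvSubsetOf_append_low cols c m (List.mem_range.mp hm)).symm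
    · refine List.map_congr_left ?_
      intro m hm
      exact (pvSubsetOf_append_high cols c m (List.mem_range.mp hm)).symm

-- every mask in 1 .. 2^n - 1 gives a nonempty subset (for nonempty cols)
theorem pvSubsetOf_ne_nil (cols : List String) (m : Nat) (h0 : m ≠ 0)
    (hm : m < 2 ^ cols.length) : pvSubsetOf cols m ≠ [] := by
  unfold pvSubsetOf
  intro hnil
  rw [List.map_eq_nil_iff, List.filter_eq_nil_iff] at hnil
  apply h0
  apply Nat.zero_of_testBit_eq_false
  intro i
  by_cases hi : i < cols.length
  · have hz := hnil i (List.mem_range.mpr hi)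
    simp only [decide_eq_true_eq] at hz
    rw [Nat.testBit_eq_decide_div_mod_eq, decide_eq_false_iff_not]
    rw [pvAnd_ne_iff] at hz
    exact hz
  · exact Nat.testBit_eq_false_of_lt
      (lt_of_lt_of_le hm (Nat.pow_le_pow_right (by norm_num) (by omega)))

-- A's fold equals the mapped/filtered form
theorem pvA_sets (cols : List String) :
    ((List.range (2 ^ cols.length)).drop 1).foldl (fun sets mask =>
        let subset := ((List.range cols.length).filter (fun i => mask &&& (1 <<< i) ≠ 0)).map
          (fun i => cols.getD i "")
        if subset ≠ [] then sets ++ ["(" ++ PySem.Str.join ", " subset ++ ")"] else sets) [] =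
      ((List.range (2 ^ cols.length)).drop 1).map
        (fun m => "(" ++ PySem.Str.join ", " (pvSubsetOf cols m) ++ ")") := by
  rw [PySem.List.foldl_congr_mem _ _
    (fun sets mask => sets ++ ["(" ++ PySem.Str.join ", " (pvSubsetOf cols mask) ++ ")"]) _ ?_]
  · exact PySem.List.foldl_append_singleton_eq_map _ _ []
  · intro acc m hm
    have hdrop : (List.range (2 ^ cols.length)).drop 1 =
        (List.range (2 ^ cols.length - 1)).map Nat.succ := by
      rw [show 2 ^ cols.length = (2 ^ cols.length - 1) + 1 from
        (Nat.succ_pred_eq_of_pos (Nat.two_pow_pos _)).symm, List.range_succ_eq_map]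
      simp
    rw [hdrop] at hm
    obtain ⟨k, hk, rfl⟩ := List.mem_map.mp hm
    have hk' := List.mem_range.mp hk
    have h0 : Nat.succ k ≠ 0 := Nat.succ_ne_zero k
    have hlt : Nat.succ k < 2 ^ cols.length := by omega
    have hx : ∃ x < cols.length, ¬ (k + 1 &&& 1 <<< x = 0) := by
      by_contra hcon
      push_neg at hcon
      refine pvSubsetOf_ne_nil cols (k + 1) (Nat.succ_ne_zero k) hlt ?_
      unfold pvSubsetOf
      rw [List.map_eq_nil_iff, List.filter_eq_nil_iff]
      intro a ha
      simp [hcon a (List.mem_range.mp ha)]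
    simp only [pvSubsetOf]
    simp
    exact hx

-- ===== VERDICT (by name: the statement is the Claim_ definition above) =====
theorem build_grouping_sets_sql_py_spec : Claim_equal_build_grouping_sets_sql_py := by
  intro cols _
  unfold Spec_build_grouping_sets_sql_py build_grouping_sets_sql_py build_grouping_sets_sql_py_alt
  by_cases h : cols = []
  · simp [h]
  · simp only [h, ite_false]
    rw [pvA_sets, pvDoubling_eq, ← List.map_drop, List.map_map]
    rfl
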